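-- pv_equiv track=rewrite | github.com/betauia/beta-champions | worker/worker.py | run_dummy_battle
-- ===== SOURCE A (Python) =====
-- def run_dummy_battle(bot_a: dict, bot_b: dict, num_games: int) -> dict:
--     strength_a = int(bot_a.get("strength", 1))
--     strength_b = int(bot_b.get("strength", 1))
--
--     wins_a = 0
--     wins_b = 0
--
--     for game in range(num_games):
--         # Simple deterministic fake battle:
--         # higher strength wins every game, ties alternate
--         if strength_a > strength_b:
--             wins_a += 1
--         elif strength_b > strength_a:
--             wins_b += 1
--         else:
--             if game % 2 == 0:
--                 wins_a += 1
--             else: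
--                 wins_b += 1
--
--     return {
--         "wins_a": wins_a,
--         "wins_b": wins_b,
--     }
-- ===== SOURCE B (Python) =====
-- def run_dummy_battle(bot_a: dict, bot_b: dict, num_games: int) -> dict:
--     # Closed form via the strength difference: the stronger bot wins every
--     # one of the n = max(num_games, 0) games; on a tie the even-indexed games
--     # (ceil(n/2) of them) go to A.  B's wins are whatever remains.
--     diff = int(bot_a.get("strength", 1)) - int(bot_b.get("strength", 1))
--     n = max(num_games, 0)
--     wins_a = n if diff > 0 else (n + 1) // 2 if diff == 0 else 0
--     return {"wins_a": wins_a, "wins_b": n - wins_a}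
-- ===== Notes on version B (the rewrite author's own statement) =====
-- stated objective: faster
-- what changed: Replaced the per-game simulation loop with a branch-on-strength-difference closed form: wins_a is n, ceil(n/2) or 0 according to the sign of the strength difference (n = max(num_games,0)), and wins_b is computed as the remainder n - wins_a rather than tracked separately.
import Mathlib
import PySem

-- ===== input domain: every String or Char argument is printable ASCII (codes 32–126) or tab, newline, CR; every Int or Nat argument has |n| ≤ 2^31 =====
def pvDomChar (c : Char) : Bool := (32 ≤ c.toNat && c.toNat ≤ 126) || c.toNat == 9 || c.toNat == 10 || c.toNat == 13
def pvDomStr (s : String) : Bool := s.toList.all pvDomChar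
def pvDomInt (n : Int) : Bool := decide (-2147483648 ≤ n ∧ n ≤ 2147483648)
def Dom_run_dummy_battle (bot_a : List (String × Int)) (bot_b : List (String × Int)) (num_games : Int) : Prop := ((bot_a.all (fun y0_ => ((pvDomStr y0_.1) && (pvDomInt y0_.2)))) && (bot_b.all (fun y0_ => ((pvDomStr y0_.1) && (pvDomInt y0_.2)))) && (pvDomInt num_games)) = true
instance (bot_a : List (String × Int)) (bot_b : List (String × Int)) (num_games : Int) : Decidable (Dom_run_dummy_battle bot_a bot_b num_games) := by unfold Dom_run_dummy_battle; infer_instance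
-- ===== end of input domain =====

-- B replaces A's per-game loop by a closed form on the strength difference
-- (stronger takes all n = max(num_games,0); tie: A gets ceil(n/2); B = n - wins_a); objective: faster.

-- ===== PORT A =====
def run_dummy_battle (bot_a : List (String × Int)) (bot_b : List (String × Int)) (num_games : Int) : List (String × Int) :=
  let strength_a := (PySem.Dict.mk bot_a).getD "strength" 1
  let strength_b := (PySem.Dict.mk bot_b).getD "strength" 1
  let w := (PySem.List.pyRange 0 num_games 1).foldl
    (fun (w : Int × Int) game =>
      if strength_a > strength_b then (w.1 + 1, w.2)
      else if strength_b > strength_a then (w.1, w.2 + 1)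
      else if PySem.Int.mod game 2 = 0 then (w.1 + 1, w.2)
      else (w.1, w.2 + 1)) (0, 0)
  [("wins_a", w.1), ("wins_b", w.2)]

-- ===== PORT B =====
def run_dummy_battle_alt (bot_a : List (String × Int)) (bot_b : List (String × Int)) (num_games : Int) : List (String × Int) :=
  let diff := (PySem.Dict.mk bot_a).getD "strength" 1 - (PySem.Dict.mk bot_b).getD "strength" 1
  let n := max num_games 0
  let wins_a : Int := if diff > 0 then n else if diff = 0 then PySem.Int.floordiv (n + 1) 2 else 0
  [("wins_a", wins_a), ("wins_b", n - wins_a)]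

-- ===== PRECONDITION & SPEC =====
def Spec_run_dummy_battle (bot_a : List (String × Int)) (bot_b : List (String × Int)) (num_games : Int) (out : List (String × Int)) : Prop := out = run_dummy_battle_alt bot_a bot_b num_games
instance (bot_a : List (String × Int)) (bot_b : List (String × Int)) (num_games : Int) (out : List (String × Int)) : Decidable (Spec_run_dummy_battle bot_a bot_b num_games out) := by unfold Spec_run_dummy_battle; infer_instance

-- ===== CLAIM =====
def Claim_equal_run_dummy_battle : Prop := ∀ (bot_a : List (String × Int)) (bot_b : List (String × Int)) (num_games : Int), Dom_run_dummy_battle bot_a bot_b num_games → Spec_run_dummy_battle bot_a bot_b num_games (run_dummy_battle bot_a bot_b num_games)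

-- ===== LEMMAS AND PROOFS =====

-- loop where every step increments the first component
theorem pv_fold_fst (l : List Int) (a b : Int) :
    l.foldl (fun (w : Int × Int) (_ : Int) => (w.1 + 1, w.2)) (a, b) = (a + l.length, b) := by
  induction l generalizing a with
  | nil => simp
  | cons x xs ih => simp [List.foldl, ih]; ring

-- loop where every step increments the second component
theorem pv_fold_snd (l : List Int) (a b : Int) :
    l.foldl (fun (w : Int × Int) (_ : Int) => (w.1, w.2 + 1)) (a, b) = (a, b + l.length) := by
  induction l generalizing b with
  | nil => simp
  | cons x xs ih => simp [List.foldl, ih]; ring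

-- the tie loop over range(m): even indices to A, odd to B
theorem pv_fold_tie (m : Nat) :
    (PySem.List.pyRange 0 m 1).foldl
      (fun (w : Int × Int) game =>
        if PySem.Int.mod game 2 = 0 then (w.1 + 1, w.2) else (w.1, w.2 + 1)) (0, 0)
      = ((((m + 1) / 2 : Nat) : Int), (((m / 2 : Nat) : Int))) := by
  induction m with
  | zero => simp [PySem.List.pyRange_one_eq_nil]
  | succ k ih =>
    have h : ((k + 1 : Nat) : Int) = (k : Int) + 1 := by push_cast; ring
    rw [h, PySem.List.pyRange_one_succ_right (by positivity), List.foldl_append, ih]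
    have hm : PySem.Int.mod (k : Int) 2 = (((k % 2 : Nat)) : Int) := by
      exact_mod_cast PySem.Int.mod_natCast k 2
    rcases Nat.even_or_odd k with he | ho
    · have hk : k % 2 = 0 := Nat.even_iff.mp he
      have hd : (2 : Int) ∣ (k : Int) := by omega
      simp [hd, Prod.ext_iff]
      omega
    · have hk : k % 2 = 1 := Nat.odd_iff.mp ho
      have hd : ¬ (2 : Int) ∣ (k : Int) := by omega
      simp [hd, Prod.ext_iff]
      omega

theorem pv_fd_succ (m : Nat) : PySem.Int.floordiv ((m : Int) + 1) 2 = (((m + 1) / 2 : Nat) : Int) := by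
  have : ((m : Int) + 1) = ((m + 1 : Nat) : Int) := by push_cast; ring
  rw [this]; exact_mod_cast PySem.Int.floordiv_natCast (m + 1) 2

-- ===== VERDICT =====
theorem run_dummy_battle_spec : Claim_equal_run_dummy_battle := by
  intro bot_a bot_b num_games _
  unfold Spec_run_dummy_battle run_dummy_battle run_dummy_battle_alt
  set sa := (PySem.Dict.mk bot_a).getD "strength" 1 with hsa
  set sb := (PySem.Dict.mk bot_b).getD "strength" 1 with hsb
  have hmax : max num_games 0 = ((num_games.toNat : Nat) : Int) := by omega
  have hlen : (PySem.List.pyRange 0 num_games 1).length = num_games.toNat := by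
    rw [PySem.List.length_pyRange_one]; omega
  by_cases h1 : sa > sb
  · have hd : sa - sb > 0 := by omega
    simp only [h1, hd, if_pos]
    rw [pv_fold_fst, hlen, hmax]
    norm_num
  · by_cases h2 : sb > sa
    · have hd : ¬ sa - sb > 0 := by omega
      have hd2 : ¬ sa - sb = 0 := by omega
      simp only [if_neg h1, if_pos h2, if_neg hd, if_neg hd2]
      rw [pv_fold_snd, hlen, hmax]
      norm_num
    · have hd : ¬ sa - sb > 0 := by omega
      have hd2 : sa - sb = 0 := by omega
      simp only [if_neg h1, if_neg h2, if_neg hd, if_pos hd2]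
      have hr : PySem.List.pyRange 0 num_games 1 = PySem.List.pyRange 0 (num_games.toNat : Int) 1 := by
        by_cases hn : 0 ≤ num_games
        · rw [Int.toNat_of_nonneg hn]
        · rw [PySem.List.pyRange_one_eq_nil (by omega), PySem.List.pyRange_one_eq_nil (by omega)]
      rw [hr, pv_fold_tie, hmax, pv_fd_succ]
      simp only [List.cons.injEq, Prod.mk.injEq, true_and, and_true]
      omega
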